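-- pv_equiv track=rewrite | github.com/LouiseDupuis/ArgumentationProject | tree_generation.py | split_tree
-- ===== SOURCE A (Python) =====
-- def split_tree(layout):
-- 	"""Return a tuple of two layouts, one containing the left
-- 	subtree of the root vertex, and one containing the original tree
-- 	with the left subtree removed."""
--
-- 	one_found = False
-- 	m = None
-- 	for i in range(len(layout)):
-- 		if layout[i] == 1:
-- 			if one_found:
-- 				m = i
-- 				break
-- 			else:
-- 				one_found = True
--
-- 	if m is None:
-- 		m = len(layout)
--
-- 	left = [layout[i] - 1 for i in range(1, m)]
-- 	rest = [0] + [layout[i] for i in range(m, len(layout))]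
-- 	return (left, rest)
-- ===== SOURCE B (Python) =====
-- def split_tree(layout):
--     """Single pass: route each element to left or rest as it is seen."""
--     left = []
--     rest = [0]
--     count = 0
--     after = False
--     for i, x in enumerate(layout):
--         if x == 1:
--             count += 1
--             if count == 2:
--                 after = True
--         if after:
--             rest.append(x)
--         elif i > 0:
--             left.append(x - 1)
--     return (left, rest)
-- ===== Notes on version B (the rewrite author's own statement) =====
-- stated objective: alternative
-- what changed: Replaces A's two-phase structure (scan for the index of the second 1, then build the two halves with slice-style comprehensions) by a single accumulating pass over enumerate(layout) that routes each element to left or rest as it is seen.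
import Mathlib
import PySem

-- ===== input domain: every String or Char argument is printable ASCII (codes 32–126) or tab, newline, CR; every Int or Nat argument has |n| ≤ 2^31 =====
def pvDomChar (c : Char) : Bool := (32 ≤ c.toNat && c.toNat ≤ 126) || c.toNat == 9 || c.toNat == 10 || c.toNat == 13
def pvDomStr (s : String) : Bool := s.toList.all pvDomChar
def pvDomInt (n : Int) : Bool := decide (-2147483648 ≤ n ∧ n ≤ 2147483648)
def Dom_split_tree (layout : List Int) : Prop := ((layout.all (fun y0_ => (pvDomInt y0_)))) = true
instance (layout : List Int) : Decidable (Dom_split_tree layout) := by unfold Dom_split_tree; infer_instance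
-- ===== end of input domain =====

-- B replaces A's find-the-second-1-then-slice structure by a single routing pass over the enumerated list (alternative decomposition, same O(n) cost).


-- ===== PORT A =====
-- the search loop: walks layout[i] for i in range(len(layout)), breaking at the second 1
def pvAFind (i : Nat) (one_found : Bool) : List Int → Option Nat
  | [] => none
  | x :: xs =>
    if x = 1 then
      (if one_found then some i else pvAFind (i + 1) true xs)
    else pvAFind (i + 1) one_found xs

def split_tree (layout : List Int) : List Int × List Int :=
  let m : Nat := (pvAFind 0 false layout).getD layout.length
  let left := (PySem.List.pyRange 1 (m : Int) 1).map (fun i => PySem.List.pyGetD layout i 0 - 1)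
  let rest := 0 :: (PySem.List.pyRange (m : Int) (layout.length : Int) 1).map
      (fun i => PySem.List.pyGetD layout i 0)
  (left, rest)

-- ===== PORT B =====
-- the single for-loop of Source B over enumerate(layout), state (left, rest, count, after)
def pvBLoop (left rest : List Int) (count : Int) (after : Bool) (i : Nat) :
    List Int → List Int × List Int
  | [] => (left, rest)
  | x :: xs =>
    let count' := if x = 1 then count + 1 else count
    let after' := if x = 1 ∧ count' = 2 then true else after
    if after' then pvBLoop left (rest ++ [x]) count' after' (i + 1) xs
    else if 0 < i then pvBLoop (left ++ [x - 1]) rest count' after' (i + 1) xs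
    else pvBLoop left rest count' after' (i + 1) xs

def split_tree_alt (layout : List Int) : List Int × List Int :=
  pvBLoop [] [0] 0 false 0 layout

-- ===== PRECONDITION & SPEC =====
def Spec_split_tree (layout : List Int) (out : List Int × List Int) : Prop := out = split_tree_alt layout
instance (layout : List Int) (out : List Int × List Int) : Decidable (Spec_split_tree layout out) := by unfold Spec_split_tree; infer_instance

-- ===== CLAIM (what is proved, stated in full; the proofs are below) =====
def Claim_equal_split_tree : Prop := ∀ (layout : List Int), Dom_split_tree layout → Spec_split_tree layout (split_tree layout)

-- ===== LEMMAS AND PROOFS =====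

-- once `after` is true, B appends everything to rest
theorem pvBLoop_after_true (xs : List Int) : ∀ (l r : List Int) (c : Int) (i : Nat),
    pvBLoop l r c true i xs = (l, r ++ xs) := by
  induction xs with
  | nil => intro l r c i; simp [pvBLoop]
  | cons x xs ih => intro l r c i; simp [pvBLoop, ih]

-- the index A's search returns is in range
theorem pvAFind_bound (xs : List Int) : ∀ (i : Nat) (b : Bool) (m : Nat),
    pvAFind i b xs = some m → i ≤ m ∧ m < i + xs.length := by
  induction xs with
  | nil => intro i b m h; simp [pvAFind] at h
  | cons x xs ih =>
    intro i b m h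
    simp only [pvAFind] at h
    split at h
    · split at h
      · simp_all
      · have := ih (i + 1) true m h; simp; omega
    · have := ih (i + 1) b m h; simp; omega

-- main invariant: B's loop (entered with after = false, past index 0) computes
-- exactly the split that A's search index describes
theorem pvBLoop_main (xs : List Int) : ∀ (i : Nat) (l r : List Int) (c : Int) (b : Bool),
    1 ≤ i → ((c = 0 ∧ b = false) ∨ (c = 1 ∧ b = true)) →
    pvBLoop l r c false i xs =
      match pvAFind i b xs with
      | none => (l ++ xs.map (fun x => x - 1), r)
      | some m => (l ++ (xs.take (m - i)).map (fun x => x - 1), r ++ xs.drop (m - i)) := by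
  induction xs with
  | nil => intro i l r c b hi hc; simp [pvBLoop, pvAFind]
  | cons x xs ih =>
    intro i l r c b hi hc
    have hipos : 0 < i := by omega
    by_cases hx : x = 1
    · rcases hc with ⟨hc, hb⟩ | ⟨hc, hb⟩
      · -- first 1: count becomes 1, after stays false, element goes to left
        subst hc; subst hb; subst hx
        have hstep : pvBLoop l r 0 false i (1 :: xs) =
            pvBLoop (l ++ [1 - 1]) r 1 false (i + 1) xs := by
          simp [pvBLoop, hipos]
        rw [hstep, ih (i + 1) (l ++ [1 - 1]) r 1 true (by omega) (Or.inr ⟨rfl, rfl⟩)]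
        have hfind : pvAFind i false (1 :: xs) = pvAFind (i + 1) true xs := by
          simp [pvAFind]
        rw [hfind]
        cases h : pvAFind (i + 1) true xs with
        | none => simp
        | some m =>
          have hb := pvAFind_bound xs (i + 1) true m h
          have h1 : m - i = (m - (i + 1)) + 1 := by omega
          simp [h1]
      · -- second 1: count becomes 2, after turns true, everything goes to rest
        subst hc; subst hb; subst hx
        have hstep : pvBLoop l r 1 false i (1 :: xs) =
            pvBLoop l (r ++ [1]) 2 true (i + 1) xs := by
          simp [pvBLoop]
        rw [hstep, pvBLoop_after_true]
        simp [pvAFind]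
    · -- not a 1: count and flag unchanged, element goes to left
        have hstep : pvBLoop l r c false i (x :: xs) =
            pvBLoop (l ++ [x - 1]) r c false (i + 1) xs := by
          simp [pvBLoop, hx, hipos]
        rw [hstep, ih (i + 1) (l ++ [x - 1]) r c b (by omega) hc]
        have hfind : pvAFind i b (x :: xs) = pvAFind (i + 1) b xs := by
          simp [pvAFind, hx]
        rw [hfind]
        cases h : pvAFind (i + 1) b xs with
        | none => simp
        | some m =>
          have hb := pvAFind_bound xs (i + 1) b m h
          have h1 : m - i = (m - (i + 1)) + 1 := by omega
          simp [h1]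

-- a range-comprehension over indices 1..m reads off a take/drop of the list
theorem map_pyRange_getD (layout : List Int) (m : Nat) (hm : m ≤ layout.length) (f : Int → Int) :
    (PySem.List.pyRange 1 (m : Int)).map (fun j => f (PySem.List.pyGetD layout j 0)) =
      ((layout.take m).drop 1).map f := by
  have e1 : ∀ j ∈ PySem.List.pyRange 1 (m : Int),
      f (PySem.List.pyGetD layout j 0) = f (PySem.List.pyGetD (layout.take m) j 0) := by
    intro j hj
    rw [PySem.List.mem_pyRange_one] at hj
    have h0 : (0:Int) ≤ j := by omega
    have h1 : j < (layout.length : Int) := by omega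
    have h2 : j < ((layout.take m).length : Int) := by simp; omega
    rw [PySem.List.pyGetD_eq_getElem layout 0 h0 h1,
        PySem.List.pyGetD_eq_getElem (layout.take m) 0 h0 h2,
        List.getElem_take]
  rw [List.map_congr_left e1]
  have e2 : (PySem.List.pyRange 1 (m : Int)).map
        (fun j => f (PySem.List.pyGetD (layout.take m) j 0)) =
      ((PySem.List.pyRange 1 (m : Int)).map
        (fun j => PySem.List.pyGetD (layout.take m) j 0)).map f := by
    rw [List.map_map]; rfl
  rw [e2]
  have hlen : (m : Int) = ((layout.take m).length : Int) := by simp; omega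
  rw [hlen, PySem.List.map_pyGetD_pyRange' (layout.take m) 0 (by norm_num : (0:Int) ≤ 1)]
  norm_num

-- the tail comprehension [layout[i] for i in range(m, len(layout))] is a drop
theorem map_pyRange_getD_tail (layout : List Int) (m : Nat) :
    (PySem.List.pyRange (m : Int) (layout.length : Int)).map
      (fun j => PySem.List.pyGetD layout j 0) = layout.drop m := by
  rw [PySem.List.map_pyGetD_pyRange' layout 0 (by positivity : (0:Int) ≤ (m : Int))]
  simp

theorem split_tree_spec : Claim_equal_split_tree := by
  unfold Claim_equal_split_tree Spec_split_tree
  intro layout _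
  cases layout with
  | nil => decide
  | cons x xs =>
    by_cases hx : x = 1
    · subst hx
      have hB : split_tree_alt (1 :: xs) = pvBLoop [] [0] 1 false 1 xs := by
        simp [split_tree_alt, pvBLoop]
      have hF : pvAFind 0 false (1 :: xs) = pvAFind 1 true xs := by simp [pvAFind]
      rw [hB, pvBLoop_main xs 1 [] [0] 1 true (by omega) (Or.inr ⟨rfl, rfl⟩)]
      simp only [split_tree, hF]
      cases h : pvAFind 1 true xs with
      | none =>
        simp only [Option.getD_none]
        rw [map_pyRange_getD ((1:Int) :: xs) (((1:Int) :: xs).length) (le_refl _) (fun v => v - 1),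
            map_pyRange_getD_tail ((1:Int) :: xs) (((1:Int) :: xs).length)]
        simp
      | some m =>
        have hb := pvAFind_bound xs 1 true m h
        have hm : m ≤ ((1:Int) :: xs).length := by simp; omega
        simp only [Option.getD_some]
        rw [map_pyRange_getD ((1:Int) :: xs) m hm (fun v => v - 1),
            map_pyRange_getD_tail ((1:Int) :: xs) m]
        have h1 : m = (m - 1) + 1 := by omega
        rw [h1]
        simp [List.take_succ_cons, List.drop_succ_cons]
    · have hB : split_tree_alt (x :: xs) = pvBLoop [] [0] 0 false 1 xs := by
        simp [split_tree_alt, pvBLoop, hx]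
      have hF : pvAFind 0 false (x :: xs) = pvAFind 1 false xs := by simp [pvAFind, hx]
      rw [hB, pvBLoop_main xs 1 [] [0] 0 false (by omega) (Or.inl ⟨rfl, rfl⟩)]
      simp only [split_tree, hF]
      cases h : pvAFind 1 false xs with
      | none =>
        simp only [Option.getD_none]
        rw [map_pyRange_getD (x :: xs) ((x :: xs).length) (le_refl _) (fun v => v - 1),
            map_pyRange_getD_tail (x :: xs) ((x :: xs).length)]
        simp
      | some m =>
        have hb := pvAFind_bound xs 1 false m h
        have hm : m ≤ (x :: xs).length := by simp; omega
        simp only [Option.getD_some]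
        rw [map_pyRange_getD (x :: xs) m hm (fun v => v - 1),
            map_pyRange_getD_tail (x :: xs) m]
        have h1 : m = (m - 1) + 1 := by omega
        rw [h1]
        simp [List.take_succ_cons, List.drop_succ_cons]
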